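-- pv_equiv track=rewrite | github.com/AlbertoMarquez794/Problem-solving | OmegaUP/Python/RedNum.py | count_digits_to_square
-- ===== SOURCE A (Python) =====
-- import math
-- from itertools import combinations
--
-- def is_perfect_square(n):
--     root = int(math.sqrt(n)) #Sacamos la raiz cuadrada del numero que buscamos
--     return root*root == n #Verificamos si la raiz al cuadrado es igual al numero de entrada
--
-- def count_digits_to_square(n):
--     s = str(n) #Convertimos el número en cadena
--     n = len(s) #Sacamos la longitud de la cadena
--     minDigitos = n - 1 #El peor de los casos es que la cantidad máxima de dígitos que se pueden eliminar es n-1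
--     for i in range(minDigitos + 1):
--         for digitos in combinations(range(n), i):
--             cadNueva = ''.join(s[i] for i in range(n) if i not in digitos)
--             if cadNueva[0] != '0': # verificar que no queden ceros a la izquierda
--                 num = int(cadNueva)
--                 if is_perfect_square(num):
--                     return i
--     return -1
-- ===== SOURCE B (Python) =====
-- def _is_subseq(t, s):
--     if not t:
--         return True
--     if not s:
--         return False
--     if t[0] == s[0]:
--         return _is_subseq(t[1:], s[1:])
--     return _is_subseq(t, s[1:])
--
-- def count_digits_to_square(n):
--     s = str(n)
--     best = -1
--     k = 1
--     while k * k <= n: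
--         t = str(k * k)
--         if _is_subseq(t, s) and len(t) > best:
--             best = len(t)
--         k += 1
--     return len(s) - best if best != -1 else -1
-- ===== Notes on version B (the rewrite author's own statement) =====
-- stated objective: alternative
-- what changed: A brute-forces all subsets of digit positions to delete (via itertools.combinations, smallest deletion count first); B instead enumerates the perfect squares k*k <= n and keeps the longest one whose decimal string is a subsequence of str(n), returning len(str(n)) minus that length (or -1).
-- crash fix: On every n < 0 A raises ValueError (math.sqrt of the negative candidate str(n) itself) while B finds no square k*k <= n and returns -1. — e.g. on count_digits_to_square(-5): A raises ValueError, B returns -1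
import Mathlib
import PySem

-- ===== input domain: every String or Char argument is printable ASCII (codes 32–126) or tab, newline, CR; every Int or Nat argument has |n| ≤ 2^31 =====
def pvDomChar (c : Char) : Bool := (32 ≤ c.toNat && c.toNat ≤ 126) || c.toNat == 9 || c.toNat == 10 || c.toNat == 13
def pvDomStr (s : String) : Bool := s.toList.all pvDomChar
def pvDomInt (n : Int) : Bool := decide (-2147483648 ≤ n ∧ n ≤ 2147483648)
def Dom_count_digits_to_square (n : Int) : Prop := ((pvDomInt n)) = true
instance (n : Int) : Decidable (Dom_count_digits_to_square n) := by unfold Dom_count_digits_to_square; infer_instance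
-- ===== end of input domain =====

-- B replaces A's brute-force enumeration of deletion position subsets by an enumeration of the
-- perfect squares k*k ≤ n, keeping the longest one that is a subsequence of str(n) (objective:
-- alternative algorithm; not measured faster on the generated inputs).

-- ===== PORT A =====

-- is_perfect_square: int(math.sqrt(n)) ported as Nat.sqrt on n.toNat — exact for the
-- 0 ≤ n ≤ 2^31 arguments that occur under Pre_ (float sqrt is correctly rounded there).
def pvIsPerfectSquare (num : Int) : Bool :=
  let root : Int := (Nat.sqrt num.toNat : Int)
  root * root == num

-- int(cadNueva), ported as the decimal digit fold: exact on the nonempty all-digit strings that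
-- reach it here (PySem.Int.ofChars? computes the same value on those strings, but its parse loop
-- is a private definition of the prelude which proofs cannot reference).
def pvIntOfDigits (cs : List Char) : Int :=
  cs.foldl (fun a c => a * 10 + ((c.toNat : Int) - 48)) 0

-- cadNueva = ''.join(s[i] for i in range(n) if i not in digitos)
def pvCadNueva (s : List Char) (L : Int) (digitos : List Int) : List Char :=
  ((PySem.List.pyRange 0 L 1).filter (fun i => !(digitos.contains i))).map
    (fun i => PySem.List.pyGetD s i ' ')

-- body of the inner loop: cadNueva[0] != '0' and is_perfect_square(int(cadNueva)).
-- (cadNueva is never empty here — at most n-1 of the n digits are deleted — so the [] branch,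
-- where Python would raise IndexError on cadNueva[0], is unreachable.)
def pvCheck (s : List Char) (L : Int) (digitos : List Int) : Bool :=
  match pvCadNueva s L digitos with
  | [] => false
  | c :: rest => if c ≠ '0' then pvIsPerfectSquare (pvIntOfDigits (c :: rest)) else false

-- 'for i in range(minDigitos + 1): for digitos in combinations(range(n), i): … return i' / 'return -1'
def pvALoop (s : List Char) (L : Int) : List Int → Int
  | [] => -1
  | i :: rest =>
      if (PySem.List.combinations (PySem.List.pyRange 0 L 1) i.toNat).any (pvCheck s L) then i
      else pvALoop s L rest

def count_digits_to_square (n : Int) : Int :=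
  let s := PySem.Int.toChars n        -- str(n), kept on the List Char side
  let L : Int := (s.length : Int)     -- n = len(s)
  let minDigitos := L - 1
  pvALoop s L (PySem.List.pyRange 0 (minDigitos + 1) 1)

-- ===== PORT B =====

-- _is_subseq(t, s): structural two-pointer subsequence check
def pvIsSubseq : List Char → List Char → Bool
  | [], _ => true
  | _ :: _, [] => false
  | c :: cs, d :: ds => if c = d then pvIsSubseq cs ds else pvIsSubseq (c :: cs) ds

-- 'while k*k <= n: …' of B, k counts up, best tracks the longest matched square.
-- The structural fuel argument only makes the recursion total: with the n.toNat + 1 budget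
-- passed below the k*k > n exit is always reached first (k advances by 1 per step).
def pvBLoop (n : Int) (s : List Char) : Nat → Nat → Int → Int
  | 0, _, best => best
  | fuel + 1, k, best =>
      if (k : Int) * (k : Int) ≤ n then
        let t := PySem.Int.toChars ((k : Int) * (k : Int))
        pvBLoop n s fuel (k + 1)
          (if pvIsSubseq t s && decide ((t.length : Int) > best) then (t.length : Int) else best)
      else best

def count_digits_to_square_alt (n : Int) : Int :=
  let s := PySem.Int.toChars n
  let best := pvBLoop n s (n.toNat + 1) 1 (-1)
  if best != -1 then (s.length : Int) - best else -1

-- ===== PRECONDITION & SPEC =====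
-- Pre_ excludes exactly the inputs on which A raises: for n < 0 the very first candidate is
-- str(n) itself, a negative number, and math.sqrt raises ValueError.
def Pre_count_digits_to_square (n : Int) : Prop := 0 ≤ n
instance (n : Int) : Decidable (Pre_count_digits_to_square n) := by unfold Pre_count_digits_to_square; infer_instance

def pvWitness_count_digits_to_square : Int := 16

-- On every negative n, A raises ValueError (math.sqrt of a negative number) while B finds no
-- perfect square k*k ≤ n and returns -1.
def Raises_count_digits_to_square (n : Int) : Prop := n < 0
instance (n : Int) : Decidable (Raises_count_digits_to_square n) := by unfold Raises_count_digits_to_square; infer_instance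

def pvRaiseWitness_count_digits_to_square : Int := -5
def pvRaiseWitnessOut_count_digits_to_square : Int := -1

def Spec_count_digits_to_square (n : Int) (out : Int) : Prop := out = count_digits_to_square_alt n
instance (n : Int) (out : Int) : Decidable (Spec_count_digits_to_square n out) := by unfold Spec_count_digits_to_square; infer_instance

-- ===== CLAIM (what is proved, stated in full; the proofs are below) =====
def Claim_equal_count_digits_to_square : Prop := ∀ (n : Int), Dom_count_digits_to_square n → Pre_count_digits_to_square n → Spec_count_digits_to_square n (count_digits_to_square n)

def Claim_raises_count_digits_to_square : Prop := (∀ (n : Int), Dom_count_digits_to_square n → Raises_count_digits_to_square n → ¬ Pre_count_digits_to_square n) ∧ (Dom_count_digits_to_square (pvRaiseWitness_count_digits_to_square) ∧ Raises_count_digits_to_square (pvRaiseWitness_count_digits_to_square) ∧ count_digits_to_square_alt (pvRaiseWitness_count_digits_to_square) = pvRaiseWitnessOut_count_digits_to_square)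

-- ===== LEMMAS AND PROOFS =====

/-! ### decimal digit strings -/

/-- the numeric value of a decimal digit string, as A's fold computes it -/
def pvValN (t : List Char) : Nat := t.foldl (fun a c => a * 10 + (c.toNat - 48)) 0

def pvAllDigit (t : List Char) : Prop := ∀ c ∈ t, c.isDigit = true

lemma pv_digit_toNat {c : Char} (h : c.isDigit = true) : 48 ≤ c.toNat ∧ c.toNat ≤ 57 := by
  simp [Char.isDigit] at h
  exact ⟨h.1, h.2⟩

lemma pv_digitChar_spec {d : Nat} (h : d < 10) :
    (Nat.digitChar d).isDigit = true ∧ (Nat.digitChar d).toNat = 48 + d ∧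
      (Nat.digitChar d = '0' ↔ d = 0) := by
  interval_cases d <;> refine ⟨by decide, by decide, by decide⟩

lemma pv_digitChar_inv {c : Char} (h : c.isDigit = true) :
    Nat.digitChar (c.toNat - 48) = c := by
  simp [Char.isDigit] at h
  obtain ⟨h1, h2⟩ := h
  conv_rhs => rw [← Char.ofNat_toNat c]
  have h1' : 48 ≤ c.toNat := h1
  have h2' : c.toNat ≤ 57 := h2
  generalize c.toNat = u at h1' h2' ⊢
  interval_cases u <;> decide

lemma pvValN_append_last (xs : List Char) (c : Char) :
    pvValN (xs ++ [c]) = 10 * pvValN xs + (c.toNat - 48) := by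
  unfold pvValN
  rw [List.foldl_append]
  simp [Nat.mul_comm]

lemma pv_foldl_lt : ∀ (t : List Char) (a : Nat), pvAllDigit t →
    t.foldl (fun a c => a * 10 + (c.toNat - 48)) a < (a + 1) * 10 ^ t.length := by
  intro t
  induction t with
  | nil => intro a _; simp
  | cons c t ih =>
      intro a h
      have hc : c.isDigit = true := h c (by simp)
      have hb := pv_digit_toNat hc
      have ht : pvAllDigit t := fun x hx => h x (by simp [hx])
      have := ih (a * 10 + (c.toNat - 48)) ht
      simp only [List.foldl_cons, List.length_cons]
      calc List.foldl (fun a c => a * 10 + (c.toNat - 48)) (a * 10 + (c.toNat - 48)) t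
        < (a * 10 + (c.toNat - 48) + 1) * 10 ^ t.length := this
        _ ≤ (a + 1) * 10 ^ (t.length + 1) := by
            rw [pow_succ]
            have : a * 10 + (c.toNat - 48) + 1 ≤ (a + 1) * 10 := by omega
            nlinarith [pow_pos (show 0 < 10 by norm_num) t.length]

lemma pvValN_lt {t : List Char} (h : pvAllDigit t) : pvValN t < 10 ^ t.length := by
  simpa using pv_foldl_lt t 0 h

lemma pv_foldl_int : ∀ (t : List Char) (a : Nat), pvAllDigit t →
    t.foldl (fun x c => x * 10 + ((c.toNat : Int) - 48)) (a : Int)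
      = ((t.foldl (fun x c => x * 10 + (c.toNat - 48)) a : Nat) : Int) := by
  intro t
  induction t with
  | nil => intro a _; simp
  | cons c t ih =>
      intro a h
      have hc := pv_digit_toNat (h c (by simp))
      have ht : pvAllDigit t := fun x hx => h x (by simp [hx])
      simp only [List.foldl_cons]
      rw [show (a : Int) * 10 + ((c.toNat : Int) - 48) = ((a * 10 + (c.toNat - 48) : Nat) : Int) by push_cast [hc.1]; omega]
      exact ih _ ht

lemma pvIntOfDigits_eq {t : List Char} (h : pvAllDigit t) :
    pvIntOfDigits t = ((pvValN t : Nat) : Int) := by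
  simpa using pv_foldl_int t 0 h

lemma pvValN_digitChar_rev (L : List Nat) (h : ∀ d ∈ L, d < 10) :
    pvValN (L.reverse.map Nat.digitChar) = Nat.ofDigits 10 L := by
  induction L with
  | nil => simp [pvValN]
  | cons d L ih =>
      have hd : d < 10 := h d (by simp)
      have hL : ∀ x ∈ L, x < 10 := fun x hx => h x (by simp [hx])
      simp only [List.reverse_cons, List.map_append, List.map_cons, List.map_nil]
      rw [pvValN_append_last, ih hL, Nat.ofDigits_cons]
      have : (Nat.digitChar d).toNat = 48 + d := (pv_digitChar_spec hd).2.1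
      omega

/-! ### str(n) for n ≥ 0 via Nat.digits -/

/-- big-endian decimal character string of a positive natural -/
def pvToCharsN (v : Nat) : List Char := (Nat.digits 10 v).reverse.map Nat.digitChar

lemma pv_toDigitsCore_spec : ∀ (f v : Nat) (acc : List Char), v < f →
    Nat.toDigitsCore 10 f v acc = (if v = 0 then ['0'] else pvToCharsN v) ++ acc := by
  intro f
  induction f with
  | zero => intro v acc h; omega
  | succ f ih =>
      intro v acc h
      rw [Nat.toDigitsCore]
      by_cases h0 : v / 10 = 0
      · simp only [h0, reduceIte]
        by_cases hv : v = 0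
        · simp [hv]
          decide
        · have hlt : v < 10 := by omega
          have : Nat.digits 10 v = [v] := by
            rw [Nat.digits_def' (by norm_num : (1:Nat) < 10) (by omega)]
            simp [Nat.mod_eq_of_lt hlt, h0]
          simp [hv, pvToCharsN, this, Nat.mod_eq_of_lt hlt]
      · have hv : v ≠ 0 := by intro hv; simp [hv] at h0
        have hd : v / 10 < f := by
          have := Nat.div_lt_self (Nat.pos_of_ne_zero hv) (by norm_num : 1 < 10)
          omega
        rw [if_neg h0, ih (v / 10) _ hd, if_neg h0, if_neg hv]
        unfold pvToCharsN
        rw [Nat.digits_def' (by norm_num : (1:Nat) < 10) (Nat.pos_of_ne_zero hv)]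
        simp

lemma pv_toChars_nonneg (v : Nat) :
    PySem.Int.toChars (v : Int) = if v = 0 then ['0'] else pvToCharsN v := by
  rw [PySem.Int.toChars]
  have h1 : ¬ ((v : Int) < 0) := by omega
  rw [if_neg h1]
  have h2 : (v : Int).toNat = v := by omega
  rw [h2, Nat.toDigits]
  rw [pv_toDigitsCore_spec (v + 1) v [] (Nat.lt_succ_self v)]
  simp

lemma pv_toCharsN_spec {v : Nat} (hv : 1 ≤ v) :
    pvAllDigit (pvToCharsN v) ∧ (pvToCharsN v).head? ≠ some '0' ∧
      pvValN (pvToCharsN v) = v ∧ pvToCharsN v ≠ [] := by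
  have hdig : ∀ d ∈ Nat.digits 10 v, d < 10 := fun d hd => Nat.digits_lt_base (by norm_num) hd
  have hne : Nat.digits 10 v ≠ [] := Nat.digits_ne_nil_iff_ne_zero.mpr (by omega)
  have hall : pvAllDigit (pvToCharsN v) := by
    intro c hc
    unfold pvToCharsN at hc
    obtain ⟨d, hd, rfl⟩ := List.mem_map.mp hc
    exact (pv_digitChar_spec (hdig d (List.mem_reverse.mp hd))).1
  refine ⟨hall, ?_, ?_, ?_⟩
  · have hrev : (Nat.digits 10 v).reverse ≠ [] := by simpa using hne
    rw [pvToCharsN, List.head?_eq_some_head (by simpa using hrev), List.head_map]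
    have hh : (Nat.digits 10 v).reverse.head hrev = (Nat.digits 10 v).getLast hne := by
      simp [List.head_reverse]
    rw [hh]
    have hlast := Nat.getLast_digit_ne_zero 10 (m := v) (by omega)
    have hlt : (Nat.digits 10 v).getLast hne < 10 :=
      hdig _ (List.getLast_mem hne)
    intro hcontra
    have := (pv_digitChar_spec hlt).2.2.mp (by simpa using hcontra)
    exact hlast this
  · rw [pvToCharsN, pvValN_digitChar_rev _ hdig, Nat.ofDigits_digits]
  · intro hcontra
    unfold pvToCharsN at hcontra
    simp at hcontra
    exact hne hcontra

lemma pv_roundtrip {t : List Char} (hd : pvAllDigit t) (hne : t ≠ [])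
    (h0 : t.head? ≠ some '0') :
    1 ≤ pvValN t ∧ PySem.Int.toChars ((pvValN t : Nat) : Int) = t := by
  set L : List Nat := (t.map (fun c => c.toNat - 48)).reverse with hL
  have hlt : ∀ d ∈ L, d < 10 := by
    intro d hdm
    rw [hL, List.mem_reverse] at hdm
    obtain ⟨c, hc, rfl⟩ := List.mem_map.mp hdm
    have := pv_digit_toNat (hd c hc)
    omega
  have hmap : L.reverse.map Nat.digitChar = t := by
    rw [hL, List.reverse_reverse, List.map_map]
    have : ∀ c ∈ t, (Nat.digitChar ∘ fun c => c.toNat - 48) c = id c := by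
      intro c hc
      simp [pv_digitChar_inv (hd c hc)]
    rw [List.map_congr_left this, List.map_id]
  have hval : pvValN t = Nat.ofDigits 10 L := by
    rw [← hmap, pvValN_digitChar_rev _ hlt]
  have hLne : L ≠ [] := by
    rw [hL]; simpa using hne
  have hlast : ∀ (h : L ≠ []), L.getLast h ≠ 0 := by
    intro h
    have hmne : t.map (fun c => c.toNat - 48) ≠ [] := by simpa using hne
    have hgl : L.getLast h = (t.map (fun c => c.toNat - 48)).head hmne :=
      List.getLast_reverse _
    rw [hgl]
    obtain ⟨c, t', rfl⟩ := List.exists_cons_of_ne_nil hne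
    simp only [List.map_cons, List.head_cons]
    have hcd := hd c (by simp)
    intro hc0
    have : c = '0' := by
      have := pv_digitChar_inv hcd
      rw [hc0] at this
      simpa using this.symm
    simp [this] at h0
  have hdig : Nat.digits 10 (Nat.ofDigits 10 L) = L :=
    Nat.digits_ofDigits 10 (by norm_num) L hlt hlast
  have hvpos : 1 ≤ pvValN t := by
    rcases Nat.eq_zero_or_pos (pvValN t) with h | h
    · exfalso
      rw [hval] at h
      rw [h] at hdig
      simp at hdig
      exact hLne hdig
    · exact h
  refine ⟨hvpos, ?_⟩
  rw [pv_toChars_nonneg, if_neg (by omega), pvToCharsN, hval, hdig, hmap]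

lemma pv_s_digits (v : Nat) : pvAllDigit (PySem.Int.toChars (v : Int)) := by
  rw [pv_toChars_nonneg]
  by_cases hv : v = 0
  · simp [hv, pvAllDigit]
  · rw [if_neg hv]
    exact (pv_toCharsN_spec (by omega)).1

lemma pv_valN_s (v : Nat) : pvValN (PySem.Int.toChars (v : Int)) = v := by
  rw [pv_toChars_nonneg]
  by_cases hv : v = 0
  · simp [hv]; decide
  · rw [if_neg hv]
    exact (pv_toCharsN_spec (by omega)).2.2.1

lemma pv_s_len_pow {v : Nat} (hv : 1 ≤ v) :
    10 ^ ((PySem.Int.toChars (v : Int)).length - 1) ≤ v := by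
  rw [pv_toChars_nonneg, if_neg (by omega)]
  have hlen : (pvToCharsN v).length = (Nat.digits 10 v).length := by
    simp [pvToCharsN]
  rw [hlen]
  have h1 : 10 ^ (Nat.digits 10 v).length ≤ 10 * v :=
    Nat.base_pow_length_digits_le 10 v (by norm_num) (by omega)
  have hlp : 1 ≤ (Nat.digits 10 v).length := by
    have hne : Nat.digits 10 v ≠ [] := Nat.digits_ne_nil_iff_ne_zero.mpr (by omega)
    cases h : Nat.digits 10 v with
    | nil => exact absurd h hne
    | cons a l => simp
  have h2 : 10 ^ ((Nat.digits 10 v).length - 1) * 10 = 10 ^ (Nat.digits 10 v).length := by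
    rw [← pow_succ]
    congr 1
    omega
  omega

lemma pv_val_le {v : Nat} {t : List Char} (ht : t.Sublist (PySem.Int.toChars (v : Int)))
    (hne : t ≠ []) : pvValN t ≤ v := by
  set s := PySem.Int.toChars (v : Int) with hs
  have hsd : pvAllDigit s := pv_s_digits v
  have htd : pvAllDigit t := fun c hc => hsd c (ht.mem hc)
  by_cases hlen : t.length = s.length
  · have : t = s := ht.eq_of_length hlen
    rw [this, hs, pv_valN_s]
  · have hlt : t.length < s.length := lt_of_le_of_ne ht.length_le hlen
    by_cases hv : v = 0
    · exfalso
      rw [hv, pv_toChars_nonneg] at hs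
      rw [if_pos rfl] at hs
      rw [hs] at hlt
      simp only [List.length_singleton] at hlt
      exact hne (List.eq_nil_of_length_eq_zero (by omega))
    · have h1 := pvValN_lt htd
      have h2 : 10 ^ t.length ≤ 10 ^ (s.length - 1) :=
        Nat.pow_le_pow_right (by norm_num) (by omega)
      have h3 := pv_s_len_pow (v := v) (by omega)
      rw [← hs] at h3
      omega

lemma pv_toChars_ne_nil (w : Int) : PySem.Int.toChars w ≠ [] := by
  by_cases hw : w < 0
  · rw [PySem.Int.toChars, if_pos hw]
    simp
  · have hww : w = ((w.toNat : Nat) : Int) := by omega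
    rw [hww, pv_toChars_nonneg]
    by_cases h0 : w.toNat = 0
    · simp [h0]
    · rw [if_neg h0]
      exact (pv_toCharsN_spec (by omega)).2.2.2

/-! ### subsequences and index deletion -/

lemma pvIsSubseq_iff : ∀ (t s : List Char), pvIsSubseq t s = true ↔ t.Sublist s := by
  intro t s
  induction s generalizing t with
  | nil =>
      cases t with
      | nil => simp [pvIsSubseq]
      | cons c cs => simp [pvIsSubseq]
  | cons d ds ih =>
      cases t with
      | nil => simp [pvIsSubseq]
      | cons c cs =>
          by_cases hcd : c = d
          · subst hcd
            rw [pvIsSubseq, if_pos rfl, ih cs, List.cons_sublist_cons]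
          · rw [pvIsSubseq, if_neg hcd, ih (c :: cs)]
            constructor
            · exact fun h => h.cons d
            · intro h
              rcases List.sublist_cons_iff.mp h with h' | ⟨r, hr, _⟩
              · exact h'
              · injection hr with h1 h2
                exact absurd h1 hcd

/-- proof-side form of cadNueva over Nat index lists -/
def pvDelN (s : List Char) (c : List Nat) : List Char :=
  ((List.range s.length).filter (fun j => !(c.contains j))).map (fun j => s.getD j ' ')

lemma pv_filter_mem_of_sublist {u l : List Nat} (h : u.Sublist l) (hn : l.Nodup) :
    l.filter (fun x => u.contains x) = u := by
  induction h with
  | slnil => simp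
  | @cons l₁ l₂ a h ih =>
      have hn2 : l₂.Nodup := (List.nodup_cons.mp hn).2
      have ha : a ∉ l₂ := (List.nodup_cons.mp hn).1
      have hau : a ∉ l₁ := fun hx => ha (h.mem hx)
      rw [List.filter_cons]
      simp only [List.contains_iff_mem]
      rw [if_neg (by simpa using hau)]
      exact ih hn2
  | @cons₂ l₁ l₂ a h ih =>
      have hn2 : l₂.Nodup := (List.nodup_cons.mp hn).2
      have ha : a ∉ l₂ := (List.nodup_cons.mp hn).1
      rw [List.filter_cons]
      rw [if_pos (by simp)]
      congr 1
      rw [← ih hn2]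
      apply List.filter_congr
      intro x hx
      have hxa : x ≠ a := fun hxa => ha (hxa ▸ hx)
      rw [List.contains_cons]
      simp [hxa, hx]

lemma pv_pick_sublist (s : List Char) {u : List Nat} (h : u.Sublist (List.range s.length)) :
    (u.map (fun j => s.getD j ' ')).Sublist s := by
  have hb : ∀ j ∈ u, j < s.length := by
    intro j hj
    simpa using List.mem_range.mp (h.mem hj)
  have hp : List.Pairwise (· < ·) u := List.Pairwise.sublist h List.pairwise_lt_range
  have h1 : u.map (fun j => s.getD j ' ')
      = List.map (fun x => s[x]) (u.pmap (fun j hj => (⟨j, hj⟩ : Fin s.length)) hb) := by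
    rw [List.map_pmap]
    rw [← List.pmap_eq_map (p := fun j => j < s.length) (f := fun j => s.getD j ' ') (l := u) hb]
    apply List.pmap_congr_left
    intro j hj h1 h2
    rw [List.getD_eq_getElem s ' ' h1]
    rfl
  rw [h1]
  apply List.map_getElem_sublist
  rw [List.pairwise_pmap]
  exact hp.imp_of_mem (by intro a b ha hb' hab h1 h2; simpa using hab)

lemma pv_nat_sublist_range {u : List Nat} {L : Nat} (hp : List.Pairwise (· < ·) u)
    (hb : ∀ j ∈ u, j < L) : u.Sublist (List.range L) := by
  have hb' : ∀ j ∈ u, j < (List.range L).length := by simpa using hb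
  have h1 : u = List.map (fun x => (List.range L)[x]) (u.pmap (fun j hj => (⟨j, hj⟩ : Fin (List.range L).length)) hb') := by
    rw [List.map_pmap]
    conv_lhs => rw [← List.map_id u]
    rw [← List.pmap_eq_map (p := fun j => j < (List.range L).length) (f := id) (l := u) hb']
    apply List.pmap_congr_left
    intro j hj h1 h2
    simp [Fin.getElem_fin, List.getElem_range]
  rw [h1]
  apply List.map_getElem_sublist
  rw [List.pairwise_pmap]
  exact hp.imp_of_mem (by intro a b ha hb'2 hab h1 h2; simpa using hab)

lemma pv_filter_not_len {c : List Nat} {L : Nat} (h : c.Sublist (List.range L)) :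
    ((List.range L).filter (fun j => !(c.contains j))).length = L - c.length := by
  have hfl := pv_filter_mem_of_sublist h List.nodup_range
  have h1 : ((List.range L).filter (fun j => c.contains j)).length
      + ((List.range L).filter (fun j => !(c.contains j))).length = L := by
    have := List.length_eq_length_filter_add (l := List.range L) (fun j => c.contains j)
    simp only [List.length_range] at this
    omega
  rw [hfl] at h1
  omega

lemma pvDelN_spec {s : List Char} {c : List Nat} (h : c.Sublist (List.range s.length)) :
    (pvDelN s c).Sublist s ∧ (pvDelN s c).length = s.length - c.length := by
  constructor
  · exact pv_pick_sublist s (List.filter_sublist.trans (List.Sublist.refl _))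
  · rw [pvDelN, List.length_map, pv_filter_not_len h]

lemma pvDelN_surj {s t : List Char} (h : t.Sublist s) :
    ∃ c, c.Sublist (List.range s.length) ∧ c.length = s.length - t.length ∧ pvDelN s c = t := by
  obtain ⟨is, hts, hp⟩ := List.sublist_eq_map_getElem h
  set isN : List Nat := is.map Fin.val with hisN
  have hpN : List.Pairwise (· < ·) isN := by
    rw [hisN, List.pairwise_map]
    exact hp
  have hbN : ∀ j ∈ isN, j < s.length := by
    intro j hj
    rw [hisN] at hj
    obtain ⟨x, hx, rfl⟩ := List.mem_map.mp hj
    exact x.isLt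
  have hsub : isN.Sublist (List.range s.length) := pv_nat_sublist_range hpN hbN
  have hlen : isN.length = t.length := by
    rw [hisN, List.length_map, hts, List.length_map]
  refine ⟨(List.range s.length).filter (fun j => !(isN.contains j)), List.filter_sublist, ?_, ?_⟩
  · rw [pv_filter_not_len hsub, hlen]
  · rw [pvDelN]
    have hface : (List.range s.length).filter
        (fun j => !(((List.range s.length).filter (fun j => !(isN.contains j))).contains j)) =
        (List.range s.length).filter (fun j => isN.contains j) := by
      apply List.filter_congr
      intro x hx
      have hmem : (((List.range s.length).filter (fun j => !(isN.contains j))).contains x = true)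
          ↔ (x ∈ List.range s.length ∧ x ∉ isN) := by
        simp [List.mem_filter]
      by_cases hxm : x ∈ isN
      · have h1 : ¬ (((List.range s.length).filter (fun j => !(isN.contains j))).contains x = true) := by
          rw [hmem]
          simp [hxm]
        rw [Bool.not_eq_true] at h1
        rw [h1]
        simp [hxm]
      · have h1 : ((List.range s.length).filter (fun j => !(isN.contains j))).contains x = true := by
          rw [hmem]
          exact ⟨hx, hxm⟩
        rw [h1]
        simp [hxm]
    rw [hface, pv_filter_mem_of_sublist hsub List.nodup_range]
    rw [hisN, List.map_map, hts]
    apply List.map_congr_left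
    intro x hx
    rw [Function.comp_apply, List.getD_eq_getElem s ' ' x.isLt]
    rfl

/-! ### the two sides' success predicates -/

/-- A-side success: some no-leading-zero perfect-square subsequence of s has length m -/
def pvP (s : List Char) (m : Nat) : Prop :=
  ∃ t, t.Sublist s ∧ t.length = m ∧ t ≠ [] ∧ t.head? ≠ some '0' ∧
    Nat.sqrt (pvValN t) * Nat.sqrt (pvValN t) = pvValN t

/-- B-side success: some square k*k (k ≥ 1, k*k ≤ v) prints with length m as a subsequence of s -/
def pvG (v : Nat) (s : List Char) (m : Nat) : Prop :=
  ∃ k : Nat, 1 ≤ k ∧ k * k ≤ v ∧ (PySem.Int.toChars ((k * k : Nat) : Int)).length = m ∧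
    pvIsSubseq (PySem.Int.toChars ((k * k : Nat) : Int)) (s) = true

lemma pvP_iff_pvG (v : Nat) (m : Nat) :
    pvP (PySem.Int.toChars (v : Int)) m ↔ pvG v (PySem.Int.toChars (v : Int)) m := by
  constructor
  · rintro ⟨t, hsub, hlen, hne, h0, hsq⟩
    have htd : pvAllDigit t := fun c hc => pv_s_digits v c (hsub.mem hc)
    obtain ⟨hv1, hrt⟩ := pv_roundtrip htd hne h0
    refine ⟨Nat.sqrt (pvValN t), ?_, ?_, ?_, ?_⟩
    · by_contra hk
      have : Nat.sqrt (pvValN t) = 0 := by omega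
      rw [this] at hsq
      omega
    · rw [hsq]
      exact pv_val_le hsub hne
    · rw [hsq, hrt, hlen]
    · rw [hsq, hrt]
      exact (pvIsSubseq_iff t _).mpr hsub
  · rintro ⟨k, hk1, hk2, hk3, hk4⟩
    have hkk : 1 ≤ k * k := Nat.one_le_iff_ne_zero.mpr (by positivity)
    set t := PySem.Int.toChars ((k * k : Nat) : Int) with ht
    have hsp := pv_toCharsN_spec hkk
    have htd : pvAllDigit t := by rw [ht, pv_toChars_nonneg, if_neg (by omega)]; exact hsp.1
    have hne : t ≠ [] := by rw [ht, pv_toChars_nonneg, if_neg (by omega)]; exact hsp.2.2.2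
    have h0 : t.head? ≠ some '0' := by rw [ht, pv_toChars_nonneg, if_neg (by omega)]; exact hsp.2.1
    have hval : pvValN t = k * k := by rw [ht, pv_toChars_nonneg, if_neg (by omega)]; exact hsp.2.2.1
    refine ⟨t, (pvIsSubseq_iff t _).mp hk4, hk3, hne, h0, ?_⟩
    rw [hval, show k * k = k ^ 2 by ring, Nat.sqrt_eq']
    ring

/-! ### A-loop and combination bridging -/

lemma pvALoop_eq (s : List Char) (L : Int) (l : List Int) :
    pvALoop s L l =
      (l.find? (fun i =>
        (PySem.List.combinations (PySem.List.pyRange 0 L 1) i.toNat).any (pvCheck s L))).getD (-1) := by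
  induction l with
  | nil => simp [pvALoop]
  | cons i rest ih =>
      rw [pvALoop, List.find?_cons]
      by_cases h : (PySem.List.combinations (PySem.List.pyRange 0 L 1) i.toNat).any (pvCheck s L) = true
      · rw [if_pos h, h]
        simp
      · rw [if_neg h]
        rw [Bool.not_eq_true] at h
        rw [h, ih]

lemma pv_find?_range'_least (q : Nat → Bool) (j : Nat) :
    ∀ (a c : Nat), a ≤ j → j < a + c → q j = true → (∀ i, a ≤ i → i < j → q i = false) →
      (List.range' a c).find? q = some j := by
  intro a c
  induction c generalizing a with
  | zero => intro h1 h2; omega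
  | succ c ih =>
      intro h1 h2 hq hmin
      rw [List.range'_succ, List.find?_cons]
      by_cases ha : a = j
      · subst ha
        rw [hq]
      · have : q a = false := hmin a le_rfl (by omega)
        rw [this]
        exact ih (a + 1) (by omega) (by omega) hq (fun i hi1 hi2 => hmin i (by omega) hi2)

lemma pv_contains_cast (c : List Nat) (j : Nat) :
    ((c.map (fun (k : Nat) => (k : Int))).contains ((j : Int))) = c.contains j := by
  by_cases h : j ∈ c <;> simp [h]

lemma pvCadNueva_cast (s : List Char) (c : List Nat) :
    pvCadNueva s ((s.length : Nat) : Int) (c.map (fun (k : Nat) => (k : Int))) = pvDelN s c := by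
  rw [pvCadNueva, pvDelN, PySem.List.pyRange_zero_natCast, List.filter_map, List.map_map]
  have hf : List.filter ((fun i => !((c.map (fun (k : Nat) => (k : Int))).contains i)) ∘ (fun k => ((k : Nat) : Int)))
        (List.range s.length) = List.filter (fun j => !(c.contains j)) (List.range s.length) := by
    apply List.filter_congr
    intro j hj
    simp only [Function.comp_apply]
    rw [pv_contains_cast]
  rw [hf]
  apply List.map_congr_left
  intro j hj
  simp only [Function.comp_apply]
  rw [PySem.List.pyGetD_natCast]

lemma pvCheck_eq_true_iff {s : List Char} {L : Int} {ds : List Int}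
    (hd : pvAllDigit (pvCadNueva s L ds)) :
    pvCheck s L ds = true ↔ (pvCadNueva s L ds ≠ [] ∧ (pvCadNueva s L ds).head? ≠ some '0' ∧
      Nat.sqrt (pvValN (pvCadNueva s L ds)) * Nat.sqrt (pvValN (pvCadNueva s L ds))
        = pvValN (pvCadNueva s L ds)) := by
  cases h : pvCadNueva s L ds with
  | nil => simp [pvCheck, h]
  | cons c rest =>
      rw [h] at hd
      by_cases hc : c = '0'
      · subst hc
        simp [pvCheck, h]
      · rw [show pvCheck s L ds = pvIsPerfectSquare (pvIntOfDigits (c :: rest)) by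
            simp [pvCheck, h, hc]]
        rw [pvIntOfDigits_eq hd]
        rw [pvIsPerfectSquare]
        constructor
        · intro hb
          refine ⟨by simp, by simpa using hc, ?_⟩
          have : ((Nat.sqrt (pvValN (c :: rest)) : Int)) * ((Nat.sqrt (pvValN (c :: rest)) : Int))
              = ((pvValN (c :: rest) : Nat) : Int) := by
            simpa [Int.toNat_natCast] using (beq_iff_eq.mp hb)
          exact_mod_cast this
        · rintro ⟨-, -, hsq⟩
          apply beq_iff_eq.mpr
          push_cast [Int.toNat_natCast]
          exact_mod_cast hsq

/-- the inner 'any combinations' test at level i succeeds iff pvP holds at kept length L - i -/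
lemma pv_anyC_iff (v : Nat) (i : Nat) (hi : i < (PySem.Int.toChars (v : Int)).length) :
    ((PySem.List.combinations
        ((List.range (PySem.Int.toChars (v : Int)).length).map (fun (k : Nat) => (k : Int))) i).any
      (pvCheck (PySem.Int.toChars (v : Int)) (((PySem.Int.toChars (v : Int)).length : Nat) : Int)) = true)
      ↔ pvP (PySem.Int.toChars (v : Int)) ((PySem.Int.toChars (v : Int)).length - i) := by
  set s := PySem.Int.toChars (v : Int) with hs
  rw [List.any_eq_true]
  constructor
  · rintro ⟨ds, hmem, hch⟩
    rw [PySem.List.mem_combinations_iff] at hmem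
    obtain ⟨hsubI, hlenI⟩ := hmem
    obtain ⟨cN, hcsub, rfl⟩ := (List.sublist_map_iff (l₂ := List.range s.length) (f := fun k : Nat => (k : Int))).mp hsubI
    have hclen : cN.length = i := by simpa using hlenI
    have hcad := pvCadNueva_cast s cN
    have hdel := pvDelN_spec hcsub
    have hdigit : pvAllDigit (pvDelN s cN) := fun c hc => pv_s_digits v c (hdel.1.mem hc)
    have hd' : pvAllDigit (pvCadNueva s ((s.length : Nat) : Int) (cN.map (fun (k : Nat) => (k : Int)))) := by
      rw [hcad]; exact hdigit
    obtain ⟨hne, h0, hsq⟩ := by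
      have := (pvCheck_eq_true_iff hd').mp hch
      rwa [hcad] at this
    exact ⟨pvDelN s cN, hdel.1, by rw [hdel.2, hclen], hne, h0, hsq⟩
  · rintro ⟨t, hsub, hlen, hne, h0, hsq⟩
    obtain ⟨cN, hcsub, hclen, hdel⟩ := pvDelN_surj hsub
    refine ⟨cN.map (fun (k : Nat) => (k : Int)), ?_, ?_⟩
    · rw [PySem.List.mem_combinations_iff]
      constructor
      · exact List.Sublist.map _ hcsub
      · rw [List.length_map, hclen, hlen]
        omega
    · have hcad := pvCadNueva_cast s cN
      have hd' : pvAllDigit (pvCadNueva s ((s.length : Nat) : Int) (cN.map (fun (k : Nat) => (k : Int)))) := by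
        rw [hcad, hdel]
        exact fun c hc => pv_s_digits v c (hsub.mem hc)
      rw [pvCheck_eq_true_iff hd', hcad, hdel]
      exact ⟨hne, h0, hsq⟩

/-! ### B-loop characterization -/

/-- lengths of the matched squares for k in [a, sqrt v] -/
def pvCands (v : Nat) (s : List Char) (a : Nat) : List Int :=
  ((List.range' a (Nat.sqrt v + 1 - a)).filter
      (fun j => pvIsSubseq (PySem.Int.toChars ((j * j : Nat) : Int)) s)).map
    (fun j => ((PySem.Int.toChars ((j * j : Nat) : Int)).length : Int))

lemma pvBLoop_eq {n : Int} (hn : 0 ≤ n) (s : List Char) :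
    ∀ (fuel k : Nat) (best : Int), Nat.sqrt n.toNat + 1 - k < fuel →
      pvBLoop n s fuel k best = List.foldl max best (pvCands n.toNat s k) := by
  intro fuel
  induction fuel with
  | zero => intro k best h; omega
  | succ fuel ih =>
      intro k best h
      have hiff : ((k : Int) * (k : Int) ≤ n) ↔ (k ≤ Nat.sqrt n.toNat) := by
        rw [Nat.le_sqrt]
        constructor
        · intro hh
          have : ((k * k : Nat) : Int) ≤ n := by push_cast; exact hh
          omega
        · intro hh
          have : ((k * k : Nat) : Int) ≤ n := by omega
          push_cast at this
          exact this
      rw [pvBLoop]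
      by_cases hguard : (k : Int) * (k : Int) ≤ n
      · rw [if_pos hguard]
        have hnc : ((k : Int) * (k : Int)) = ((k * k : Nat) : Int) := by push_cast; ring
        simp only [hnc]
        have hk : k ≤ Nat.sqrt n.toNat := hiff.mp hguard
        have hcnt : Nat.sqrt n.toNat + 1 - k = (Nat.sqrt n.toNat + 1 - (k + 1)) + 1 := by omega
        have hcands : pvCands n.toNat s k =
            (if pvIsSubseq (PySem.Int.toChars ((k * k : Nat) : Int)) s
              then [((PySem.Int.toChars ((k * k : Nat) : Int)).length : Int)] else [])
            ++ pvCands n.toNat s (k + 1) := by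
          rw [pvCands, pvCands, hcnt, List.range'_succ]
          rw [List.filter_cons]
          by_cases hcond : pvIsSubseq (PySem.Int.toChars ((k * k : Nat) : Int)) s
          · rw [if_pos (by simpa using hcond), if_pos hcond]
            simp
          · rw [if_neg (by simpa using hcond), if_neg hcond]
            simp
        rw [hcands, ih (k + 1) _ (by omega)]
        set T := PySem.Int.toChars ((k * k : Nat) : Int) with hT
        by_cases hcond : pvIsSubseq T s = true
        · rw [if_pos hcond, List.foldl_append]
          simp only [List.foldl_cons, List.foldl_nil]
          congr 1
          by_cases hgt : best < (T.length : Int)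
          · rw [if_pos (by simp [hcond, hgt])]
            rw [max_def]
            split_ifs <;> omega
          · rw [if_neg (by simp [hcond, hgt])]
            rw [max_def]
            split_ifs <;> omega
        · rw [if_neg hcond, if_neg (by simp [hcond]), List.nil_append]
      · rw [if_neg hguard]
        have hk : ¬ (k ≤ Nat.sqrt n.toNat) := fun hh => hguard (hiff.mpr hh)
        have hz : Nat.sqrt n.toNat + 1 - k = 0 := by omega
        rw [pvCands, hz]
        simp

lemma pv_foldl_max_mem : ∀ (l : List Int) (b : Int), List.foldl max b l = b ∨ List.foldl max b l ∈ l := by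
  intro l
  induction l with
  | nil => intro b; left; rfl
  | cons a l ih =>
      intro b
      rw [List.foldl_cons]
      rcases ih (max b a) with h | h
      · rcases max_choice b a with h2 | h2
        · left; rw [h, h2]
        · right; rw [h, h2]; simp
      · right; simp [h]

lemma pvCands_mem_iff (v : Nat) (s : List Char) (x : Int) :
    x ∈ pvCands v s 1 ↔ ∃ m : Nat, x = (m : Int) ∧ pvG v s m := by
  rw [pvCands]
  constructor
  · intro hx
    obtain ⟨j, hj, rfl⟩ := List.mem_map.mp hx
    obtain ⟨hj1, hj2⟩ := List.mem_filter.mp hj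
    rw [List.mem_range'_1] at hj1
    refine ⟨(PySem.Int.toChars ((j * j : Nat) : Int)).length, rfl, j, hj1.1, ?_, rfl, hj2⟩
    have : j ≤ Nat.sqrt v := by omega
    exact Nat.le_sqrt.mp this
  · rintro ⟨m, rfl, k, hk1, hk2, hk3, hk4⟩
    rw [List.mem_map]
    refine ⟨k, ?_, by rw [hk3]⟩
    rw [List.mem_filter, List.mem_range'_1]
    refine ⟨⟨hk1, ?_⟩, hk4⟩
    have := Nat.le_sqrt.mpr hk2
    omega

-- ===== VERDICT (by name: the statement is the Claim_ definition above) =====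
theorem count_digits_to_square_spec : Claim_equal_count_digits_to_square := by
  unfold Claim_equal_count_digits_to_square Spec_count_digits_to_square
  intro n hDom hPre
  unfold Pre_count_digits_to_square at hPre
  obtain ⟨v, rfl⟩ : ∃ v : Nat, n = (v : Int) := ⟨n.toNat, by omega⟩
  simp only [count_digits_to_square, count_digits_to_square_alt]
  set s := PySem.Int.toChars ((v : Nat) : Int) with hs
  set L := s.length with hL
  -- B side: rewrite the loop as a fold over the candidate lengths
  have hBfold : pvBLoop ((v : Nat) : Int) s (((v : Nat) : Int).toNat + 1) 1 (-1)
      = List.foldl max (-1) (pvCands v s 1) := by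
    rw [pvBLoop_eq (by omega) s _ 1 (-1) ?_]
    · rw [Int.toNat_natCast]
    · rw [Int.toNat_natCast]
      have := Nat.sqrt_le_self v
      omega
  rw [hBfold]
  -- A side: rewrite the loop as a least-index search
  rw [show ((L : Int) - 1 + 1) = ((L : Nat) : Int) by ring]
  rw [pvALoop_eq, PySem.List.pyRange_zero_natCast, List.find?_map]
  -- the inner predicate over Nat indices
  set q : Nat → Bool := fun j =>
    (PySem.List.combinations ((List.range L).map (fun (k : Nat) => (k : Int))) j).any
      (pvCheck s ((L : Nat) : Int)) with hq
  have hcomp : ((fun i => (PySem.List.combinations ((List.range L).map (fun (k : Nat) => (k : Int))) i.toNat).any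
      (pvCheck s ((L : Nat) : Int))) ∘ (fun (k : Nat) => (k : Int))) = q := by
    funext j
    simp [hq]
  rw [hcomp]
  have hpred : ∀ j, j < L → (q j = true ↔ pvP s (L - j)) := by
    intro j hj
    rw [hq]
    exact pv_anyC_iff v j hj
  -- members of the candidate list are positive
  have hpos : ∀ x ∈ pvCands v s 1, 1 ≤ x := by
    intro x hx
    obtain ⟨m, rfl, k, _, _, hk3, _⟩ := (pvCands_mem_iff v s x).mp hx
    have := pv_toChars_ne_nil ((k * k : Nat) : Int)
    have : 1 ≤ (PySem.Int.toChars ((k * k : Nat) : Int)).length := by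
      cases h : PySem.Int.toChars ((k * k : Nat) : Int) with
      | nil => exact absurd h this
      | cons a l => simp
    omega
  rcases pv_foldl_max_mem (pvCands v s 1) (-1) with hre | hrm
  · -- no candidate square: both sides return -1
    have hnone : ∀ x ∈ pvCands v s 1, False := by
      intro x hx
      have h1 := (PySem.List.le_foldl_max (pvCands v s 1) (-1)).2 x hx
      rw [hre] at h1
      have := hpos x hx
      omega
    have hfind : (List.range L).find? q = none := by
      rw [List.find?_eq_none]
      intro j hj hqj
      have hjL : j < L := List.mem_range.mp hj
      have hP := (hpred j hjL).mp hqj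
      have hG := (pvP_iff_pvG v (L - j)).mp hP
      exact hnone _ ((pvCands_mem_iff v s _).mpr ⟨L - j, rfl, hG⟩)
    rw [hfind, hre]
    simp
  · -- some candidate: both sides return L minus the maximal matched length
    obtain ⟨m, hmr, hGm⟩ := (pvCands_mem_iff v s _).mp hrm
    have hm1 : (1 : Int) ≤ (m : Int) := by
      rw [← hmr]
      exact hpos _ hrm
    have hm1' : 1 ≤ m := by exact_mod_cast hm1
    have hmL : m ≤ L := by
      obtain ⟨k, _, _, hk3, hk4⟩ := hGm
      have := ((pvIsSubseq_iff _ _).mp hk4).length_le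
      rw [hk3] at this
      exact this
    have hmax : ∀ m' : Nat, pvG v s m' → (m' : Int) ≤ List.foldl max (-1) (pvCands v s 1) := by
      intro m' hG'
      exact (PySem.List.le_foldl_max (pvCands v s 1) (-1)).2 _
        ((pvCands_mem_iff v s _).mpr ⟨m', rfl, hG'⟩)
    have hfind : (List.range L).find? q = some (L - m) := by
      rw [List.range_eq_range']
      apply pv_find?_range'_least q (L - m) 0 L (by omega) (by omega)
      · rw [(hpred (L - m) (by omega))]
        rw [show L - (L - m) = m by omega]
        exact (pvP_iff_pvG v m).mpr hGm
      · intro i _ hi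
        by_contra hqi
        rw [Bool.not_eq_false] at hqi
        have hiL : i < L := by omega
        have hP := (hpred i hiL).mp hqi
        have hG := (pvP_iff_pvG v (L - i)).mp hP
        have := hmax (L - i) hG
        rw [hmr] at this
        have h2 : L - i ≤ m := by exact_mod_cast this
        omega
    rw [hfind]
    have hrne : (List.foldl max (-1) (pvCands v s 1) != -1) = true := by
      rw [bne_iff_ne]
      omega
    rw [hrne]
    simp only [Option.map_some, Option.getD_some, if_true]
    rw [hmr]
    push_cast [Nat.cast_sub hmL]
    ring

@[simp] theorem count_digits_to_square_raises : Claim_raises_count_digits_to_square := by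
  unfold Claim_raises_count_digits_to_square
  exact ⟨by intro n _ h hp; unfold Raises_count_digits_to_square at h; unfold Pre_count_digits_to_square at hp; omega, by decide⟩
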